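-- pv_equiv track=rewrite | github.com/NICEdataset/DataCollectionTool | src/shared.py | get_v
-- ===== SOURCE A (Python) =====
-- TAG_na = '[none]'
--
-- def get_v(d, k):
-- 	v = d.get(k, TAG_na)
-- 	if isinstance(v, str):
-- 		for c in ['\r','\n','\t']:
-- 			v = v.replace(c,' ')
-- 		return v
-- 	else:
-- 		return str(v)
-- ===== SOURCE B (Python) =====
-- TAG_na = '[none]'
--
-- def get_v(d, k):
--     # Single pass over the characters instead of three full-string replace scans.
--     v = d.get(k, TAG_na)
--     if isinstance(v, str):
--         return ''.join(' ' if c in '\r\n\t' else c for c in v)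
--     else:
--         return str(v)
-- ===== Notes on version B (the rewrite author's own statement) =====
-- stated objective: idiomatic
-- what changed: B replaces the loop of three whole-string replace passes (one per control character) with a single character-level pass that maps each of , , to a space via one membership test.
import Mathlib
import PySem

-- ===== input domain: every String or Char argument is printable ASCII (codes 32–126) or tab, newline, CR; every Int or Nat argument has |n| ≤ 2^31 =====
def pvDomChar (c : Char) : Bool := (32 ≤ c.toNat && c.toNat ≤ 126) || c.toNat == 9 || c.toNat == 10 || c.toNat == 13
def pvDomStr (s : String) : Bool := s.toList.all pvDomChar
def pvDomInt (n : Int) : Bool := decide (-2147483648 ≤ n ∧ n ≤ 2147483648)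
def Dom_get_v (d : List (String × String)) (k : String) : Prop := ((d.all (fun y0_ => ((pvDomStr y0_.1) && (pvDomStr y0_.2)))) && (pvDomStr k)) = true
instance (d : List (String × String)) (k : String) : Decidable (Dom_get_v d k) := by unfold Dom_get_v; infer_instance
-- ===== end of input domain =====

-- B makes one character-level pass mapping \r, \n, \t to ' ', instead of A's three whole-string replace passes.


-- ===== PORT A =====
-- v = d.get(k, TAG_na); under the type convention v is always a str, so the
-- isinstance(v, str) branch is the one taken: the for-loop of three replaces.
def get_v (d : List (String × String)) (k : String) : String :=
  let v := PySem.Dict.getD ⟨d⟩ k "[none]"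
  ["\r", "\n", "\t"].foldl (fun v c => PySem.Str.replace v c " ") v

-- ===== PORT B =====
-- same lookup; then ''.join(' ' if c in '\r\n\t' else c for c in v)
def get_v_alt (d : List (String × String)) (k : String) : String :=
  let v := PySem.Dict.getD ⟨d⟩ k "[none]"
  String.ofList (v.toList.map (fun c => if c ∈ ['\r', '\n', '\t'] then ' ' else c))

-- ===== PRECONDITION & SPEC =====
def Spec_get_v (d : List (String × String)) (k : String) (out : String) : Prop := out = get_v_alt d k
instance (d : List (String × String)) (k : String) (out : String) : Decidable (Spec_get_v d k out) := by unfold Spec_get_v; infer_instance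

-- ===== CLAIM (what is proved, stated in full; the proofs are below) =====
def Claim_equal_get_v : Prop := ∀ (d : List (String × String)) (k : String), Dom_get_v d k → Spec_get_v d k (get_v d k)

-- ===== LEMMAS AND PROOFS =====

-- replace.go with a single-character pattern is a map over the characters
lemma replace_go_single (o n : Char) :
    ∀ (l : List Char) (fuel : Nat) (acc : List Char), l.length ≤ fuel →
      PySem.Chars.replace.go [o] [n] fuel l acc
        = acc.reverse ++ l.map (fun c => if c = o then n else c) := by
  intro l
  induction l with
  | nil =>
      intro fuel acc _
      cases fuel <;> simp [PySem.Chars.replace.go]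
  | cons c t ih =>
      intro fuel acc h
      cases fuel with
      | zero => simp at h
      | succ fuel =>
          simp only [PySem.Chars.replace.go]
          by_cases hc : c = o
          · subst hc
            have hpre : List.isPrefixOf [c] (c :: t) = true := by
              simp [List.isPrefixOf]
            simp only [hpre, if_true]
            rw [show List.drop (List.length [c]) (c :: t) = t by simp]
            rw [ih fuel _ (by simpa using h)]
            simp
          · have hpre : List.isPrefixOf [o] (c :: t) = false := by
              simp [List.isPrefixOf, Ne.symm hc]
            simp only [hpre]
            rw [if_neg (by simp), ih fuel _ (by simpa using h)]
            simp [hc]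

lemma replace_single (s : List Char) (o n : Char) :
    PySem.Chars.replace s [o] [n] = s.map (fun c => if c = o then n else c) := by
  rw [PySem.Chars.replace]
  simp only [List.isEmpty_cons, Bool.false_eq_true, if_false]
  exact (replace_go_single o n s s.length [] le_rfl).trans (by simp)

lemma str_version (v : String) :
    ["\r", "\n", "\t"].foldl (fun v c => PySem.Str.replace v c " ") v
      = String.ofList (v.toList.map (fun c => if c ∈ ['\r', '\n', '\t'] then ' ' else c)) := by
  simp only [List.foldl, PySem.Str.replace]
  rw [show ("\r" : String).toList = ['\r'] from rfl,
      show ("\n" : String).toList = ['\n'] from rfl,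
      show ("\t" : String).toList = ['\t'] from rfl,
      show (" " : String).toList = [' '] from rfl]
  simp only [String.toList_ofList, replace_single, List.map_map]
  congr 1
  apply List.map_congr_left
  intro c _
  by_cases h1 : c = '\r' <;> by_cases h2 : c = '\n' <;> by_cases h3 : c = '\t' <;>
    simp_all [Function.comp]

-- ===== VERDICT (by name: the statement is the Claim_ definition above) =====
theorem get_v_spec : Claim_equal_get_v := by
  intro d k _
  unfold Spec_get_v get_v get_v_alt
  exact str_version _
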